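-- pv_equiv track=rewrite | github.com/Tom-Drs/correction_sujets_pratique_nsi | 22_NSI_37/solution_exercice_2.py | depouille
-- ===== SOURCE A (Python) =====
-- def depouille(urne):
--     resultat = {}
--     for bulletin in urne:
--         if resultat.get(bulletin) is not None:
--             resultat[bulletin] = resultat[bulletin] + 1
--         else:
--             resultat.update({bulletin: 1})
--     return resultat
-- ===== SOURCE B (Python) =====
-- def depouille(urne):
--     return {bulletin: urne.count(bulletin) for bulletin in urne}
-- ===== Notes on version B (the rewrite author's own statement) =====
-- stated objective: idiomatic
-- what changed: Replaces A's single accumulating pass (dict built with get/update and manual increments) by a dict comprehension that counts each ballot with a full urne.count rescan per element.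
import Mathlib
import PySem

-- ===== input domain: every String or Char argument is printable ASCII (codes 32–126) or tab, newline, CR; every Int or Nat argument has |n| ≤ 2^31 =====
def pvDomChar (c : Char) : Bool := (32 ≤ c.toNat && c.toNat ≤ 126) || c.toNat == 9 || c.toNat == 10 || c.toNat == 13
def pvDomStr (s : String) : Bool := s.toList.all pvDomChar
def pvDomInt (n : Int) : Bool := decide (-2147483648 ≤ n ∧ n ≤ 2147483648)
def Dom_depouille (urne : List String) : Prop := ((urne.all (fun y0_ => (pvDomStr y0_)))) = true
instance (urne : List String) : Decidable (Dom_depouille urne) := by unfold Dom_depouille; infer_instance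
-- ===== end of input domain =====

-- B replaces A's single accumulating get/update pass by an idiomatic dict comprehension that rescans the list with urne.count per ballot (same output, not faster).


-- ===== PORT A =====
-- A: one accumulating pass; resultat.get(b) is not None → resultat[b] += 1, else insert 1
def depouille (urne : List String) : List (String × Int) :=
  (urne.foldl (fun resultat bulletin =>
    match resultat.get? bulletin with
    | some v => resultat.insert bulletin (v + 1)
    | none => resultat.insert bulletin 1) PySem.Dict.empty).items

-- ===== PORT B =====
-- B: dict comprehension {b: urne.count(b) for b in urne}
def depouille_alt (urne : List String) : List (String × Int) :=
  (urne.foldl (fun d bulletin => d.insert bulletin ((urne.count bulletin : Int))) PySem.Dict.empty).items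

-- ===== PRECONDITION & SPEC =====
def Spec_depouille (urne : List String) (out : List (String × Int)) : Prop := out = depouille_alt urne
instance (urne : List String) (out : List (String × Int)) : Decidable (Spec_depouille urne out) := by unfold Spec_depouille; infer_instance

-- ===== CLAIM (what is proved, stated in full; the proofs are below) =====
def Claim_equal_depouille : Prop := ∀ (urne : List String), Dom_depouille urne → Spec_depouille urne (depouille urne)

-- ===== LEMMAS AND PROOFS =====

-- ===== VERDICT (by name: the statement is the Claim_ definition above) =====
-- B's fold with a value depending only on the key: getD characterisation
theorem getD_foldl_insert_fn {α : Type} [DecidableEq α] [BEq α] [LawfulBEq α]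
    (l : List α) (f : α → Int) (d : PySem.Dict α Int) (k : α) :
    (l.foldl (fun d b => d.insert b (f b)) d).getD k 0 =
      if k ∈ l then f k else d.getD k 0 := by
  induction l generalizing d with
  | nil => simp
  | cons x xs ih =>
    simp only [List.foldl_cons, ih, List.mem_cons]
    by_cases hk : k ∈ xs
    · simp [hk]
    · by_cases hx : k = x
      · simp [hx, PySem.Dict.getD_insert_self]
      · simp [hx, hk, PySem.Dict.getD_insert_of_ne (hne := hx)]

theorem depouille_alt_eq_counter_items (urne : List String) :
    depouille_alt urne = (PySem.Dict.counter urne).items := by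
  unfold depouille_alt
  have hnd : (urne.foldl (fun d b => d.insert b ((urne.count b : Int))) PySem.Dict.empty).keys.Nodup := by
    exact PySem.Dict.nodup_keys_foldl_insert _ _ _ (by simp)
  rw [PySem.Dict.items_eq_map_keys _ hnd 0, PySem.Dict.items_counter]
  rw [PySem.Dict.keys_foldl_insert]
  simp only [PySem.Dict.keys_empty, PySem.Set.update_nil_left]
  apply List.map_congr_left
  intro k hk
  have hkm : k ∈ urne := (PySem.Set.mem_ofList _ _).mp hk
  rw [getD_foldl_insert_fn, if_pos hkm]

theorem depouille_eq_counter_items (urne : List String) :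
    depouille urne = (PySem.Dict.counter urne).items := by
  unfold depouille
  rw [← PySem.Dict.foldl_insert_getD_add_one_eq_counter]
  congr 1
  apply PySem.List.foldl_congr_mem
  intro d b _
  cases h : d.get? b with
  | some v => rw [PySem.Dict.getD_of_get?_eq_some (h := h)]
  | none => rw [PySem.Dict.getD_of_get?_eq_none (h := h)]; norm_num

theorem depouille_spec : Claim_equal_depouille := by
  intro urne _
  unfold Spec_depouille
  rw [depouille_eq_counter_items, depouille_alt_eq_counter_items]
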